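-- pv_equiv track=rewrite | github.com/hotternative/leetcode | seating.py | find_choices
-- ===== SOURCE A (Python) =====
-- from typing import List
--
-- def find_choices(path: List[int], initial_seating: List[int]):
--     choices = []
--     current_seating = path + initial_seating[len(path):]
--     for i in range(len(path), len(initial_seating)):
--         if initial_seating[i]:
--             continue
--         ppl_close = 0
--         if 0 <= i-1:
--             ppl_close += current_seating[i-1]
--         if 0 <= i-2:
--             ppl_close += current_seating[i-2]
--         if i+1 < len(current_seating):
--             ppl_close += current_seating[i+1]
--         if i+2 < len(current_seating):
--             ppl_close += current_seating[i+2]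
--         if ppl_close == 0:
--             choices.append(i)
--     return choices
-- ===== SOURCE B (Python) =====
-- from typing import List
--
-- def find_choices(path: List[int], initial_seating: List[int]):
--     m, n = len(path), len(initial_seating)
--     current = path + initial_seating[m:]
--     L = len(current)
--     # prefix sums: prefix[k] == sum(current[:k])
--     prefix = [0]
--     s = 0
--     for v in current:
--         s += v
--         prefix.append(s)
--     return [i for i in range(m, n)
--             if not initial_seating[i]
--             and prefix[min(L, i + 3)] - prefix[max(0, i - 2)] == 0]
-- ===== Notes on version B (the rewrite author's own statement) =====
-- stated objective: alternative
-- what changed: B replaces A's four guarded per-seat neighbour reads by a prefix-sum array built in one pass, testing each candidate seat with a single clamped window-sum difference prefix[min(L,i+3)]-prefix[max(0,i-2)]==0.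
import Mathlib
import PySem

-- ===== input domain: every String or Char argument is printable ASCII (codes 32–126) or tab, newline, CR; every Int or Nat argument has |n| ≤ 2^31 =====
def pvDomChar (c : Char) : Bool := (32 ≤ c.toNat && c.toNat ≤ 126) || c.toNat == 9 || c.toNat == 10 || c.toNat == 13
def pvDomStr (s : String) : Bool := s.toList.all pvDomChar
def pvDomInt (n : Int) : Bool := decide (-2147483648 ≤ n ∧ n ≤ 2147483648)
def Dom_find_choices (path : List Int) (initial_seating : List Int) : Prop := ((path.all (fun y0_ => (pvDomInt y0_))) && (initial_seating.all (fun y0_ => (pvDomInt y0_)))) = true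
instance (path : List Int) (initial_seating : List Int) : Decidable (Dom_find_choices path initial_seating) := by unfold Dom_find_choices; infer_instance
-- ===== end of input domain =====

-- B replaces A's four guarded neighbour reads per seat by a prefix-sum array and one
-- clamped window-sum test per seat (objective: alternative; same O(n) cost).

-- ===== PORT A =====
def find_choices (path : List Int) (initial_seating : List Int) : List Int :=
  let current_seating := path ++ PySem.List.slice initial_seating (some (path.length : Int)) none
  (PySem.List.pyRange (path.length : Int) (initial_seating.length : Int) 1).foldl
    (fun choices i =>
      if PySem.List.pyGetD initial_seating i 0 ≠ 0 then choices
      else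
        let ppl_close : Int := 0
        let ppl_close := if 0 ≤ i - 1 then ppl_close + PySem.List.pyGetD current_seating (i-1) 0 else ppl_close
        let ppl_close := if 0 ≤ i - 2 then ppl_close + PySem.List.pyGetD current_seating (i-2) 0 else ppl_close
        let ppl_close := if i + 1 < (current_seating.length : Int) then ppl_close + PySem.List.pyGetD current_seating (i+1) 0 else ppl_close
        let ppl_close := if i + 2 < (current_seating.length : Int) then ppl_close + PySem.List.pyGetD current_seating (i+2) 0 else ppl_close
        if ppl_close = 0 then choices ++ [i] else choices)
    []

-- ===== PORT B =====
def find_choices_alt (path : List Int) (initial_seating : List Int) : List Int :=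
  let m : Int := path.length
  let n : Int := initial_seating.length
  let current := path ++ PySem.List.slice initial_seating (some m) none
  let L : Int := current.length
  let st := current.foldl
    (fun (st : List Int × Int) v => (st.1 ++ [st.2 + v], st.2 + v)) ([0], 0)
  let pref := st.1
  (PySem.List.pyRange m n 1).filter
    (fun i => decide (PySem.List.pyGetD initial_seating i 0 = 0) &&
              decide (PySem.List.pyGetD pref (min L (i + 3)) 0
                      - PySem.List.pyGetD pref (max 0 (i - 2)) 0 = 0))

-- ===== PRECONDITION & SPEC =====
def Spec_find_choices (path : List Int) (initial_seating : List Int) (out : List Int) : Prop := out = find_choices_alt path initial_seating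
instance (path : List Int) (initial_seating : List Int) (out : List Int) : Decidable (Spec_find_choices path initial_seating out) := by unfold Spec_find_choices; infer_instance

-- ===== CLAIM (what is proved, stated in full; the proofs are below) =====
def Claim_equal_find_choices : Prop := ∀ (path : List Int) (initial_seating : List Int), Dom_find_choices path initial_seating → Spec_find_choices path initial_seating (find_choices path initial_seating)

-- ===== LEMMAS AND PROOFS =====

-- A's accumulated neighbour sum (same let-structure as the port of A)
def pplA (cur : List Int) (i : Int) : Int :=
  let p1 := if 0 ≤ i - 1 then (0:Int) + PySem.List.pyGetD cur (i-1) 0 else 0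
  let p2 := if 0 ≤ i - 2 then p1 + PySem.List.pyGetD cur (i-2) 0 else p1
  let p3 := if i + 1 < (cur.length : Int) then p2 + PySem.List.pyGetD cur (i+1) 0 else p2
  if i + 2 < (cur.length : Int) then p3 + PySem.List.pyGetD cur (i+2) 0 else p3

lemma pplA_eq (cur : List Int) (i : Int) :
    pplA cur i
    = (if 0 ≤ i - 1 then PySem.List.pyGetD cur (i-1) 0 else 0)
      + (if 0 ≤ i - 2 then PySem.List.pyGetD cur (i-2) 0 else 0)
      + (if i + 1 < (cur.length : Int) then PySem.List.pyGetD cur (i+1) 0 else 0)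
      + (if i + 2 < (cur.length : Int) then PySem.List.pyGetD cur (i+2) 0 else 0) := by
  unfold pplA
  split_ifs <;> ring

lemma prefix_fold : ∀ (l : List Int) (acc : List Int) (s : Int),
    (l.foldl (fun (st : List Int × Int) v => (st.1 ++ [st.2 + v], st.2 + v)) (acc, s)).1
    = acc ++ (List.range l.length).map (fun k => s + (l.take (k+1)).sum) := by
  intro l
  induction l with
  | nil => simp
  | cons v tl ih =>
      intro acc s
      simp only [List.foldl_cons]
      rw [ih]
      rw [List.length_cons, List.range_succ_eq_map]
      simp [List.map_map, Function.comp, List.take_succ_cons, add_assoc]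

lemma take_succ_sum (l : List Int) (k : Nat) (h : k < l.length) :
    (l.take (k+1)).sum = (l.take k).sum + l[k] := by
  rw [List.take_add_one, List.getElem?_eq_getElem h, List.sum_append]
  norm_num

lemma tele (cur : List Int) (a b : Int) (h0 : 0 ≤ a) (hab : a ≤ b) (hb : b ≤ (cur.length : Int)) :
    (cur.take b.toNat).sum - (cur.take a.toNat).sum
    = ((PySem.List.pyRange a b 1).map (fun j => PySem.List.pyGetD cur j 0)).sum := by
  induction hd : (b - a).toNat generalizing a with
  | zero =>
      have : a = b := by omega
      subst this
      rw [PySem.List.pyRange_one_eq_nil le_rfl]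
      simp
  | succ d ih =>
      have ha : a < b := by omega
      rw [PySem.List.pyRange_one_cons ha]
      simp only [List.map_cons, List.sum_cons]
      have hk : a.toNat < cur.length := by omega
      have hstep : (cur.take ((a+1)).toNat).sum
          = (cur.take a.toNat).sum + PySem.List.pyGetD cur a 0 := by
        rw [PySem.List.pyGetD_eq_getElem cur 0 h0 (by omega)]
        have h1 : (a+1).toNat = a.toNat + 1 := by omega
        rw [h1, take_succ_sum _ _ hk]
      have hrest := ih (a+1) (by omega) (by omega) (by omega)
      linarith

lemma leftSum (f : Int → Int) (i : Int) (h0 : 0 ≤ i) :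
    ((PySem.List.pyRange (max 0 (i-2)) i 1).map f).sum
    = (if 0 ≤ i - 1 then f (i-1) else 0) + (if 0 ≤ i - 2 then f (i-2) else 0) := by
  rcases (by omega : i = 0 ∨ i = 1 ∨ 2 ≤ i) with h | h | h
  · subst h
    norm_num [PySem.List.pyRange_one_eq_nil]
  · subst h
    rw [if_pos (by omega), if_neg (by omega)]
    have h1 : max 0 (1-2 : Int) = 0 := by omega
    rw [h1, PySem.List.pyRange_one_cons (a := 0) (b := 1) (by omega),
        PySem.List.pyRange_one_eq_nil (a := 0 + 1) (b := 1) (by omega)]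
    norm_num
  · rw [if_pos (by omega), if_pos (by omega)]
    have h1 : max 0 (i-2) = i - 2 := by omega
    rw [h1, PySem.List.pyRange_one_cons (a := i-2) (b := i) (by omega),
        PySem.List.pyRange_one_cons (a := i-2+1) (b := i) (by omega),
        PySem.List.pyRange_one_eq_nil (a := i-2+1+1) (b := i) (by omega)]
    simp only [List.map_cons, List.map_nil, List.sum_cons, List.sum_nil]
    rw [(by ring : i - 2 + 1 = i - 1)]
    ring

lemma rightSum (f : Int → Int) (L i : Int) (hi : i < L) :
    ((PySem.List.pyRange (i+1) (min L (i+3)) 1).map f).sum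
    = (if i + 1 < L then f (i+1) else 0) + (if i + 2 < L then f (i+2) else 0) := by
  rcases (by omega : L = i + 1 ∨ L = i + 2 ∨ i + 3 ≤ L) with h | h | h
  · rw [if_neg (by omega), if_neg (by omega)]
    rw [min_eq_left (by omega), h, PySem.List.pyRange_one_eq_nil (by omega)]
    simp
  · rw [if_pos (by omega), if_neg (by omega)]
    rw [min_eq_left (by omega), h, PySem.List.pyRange_one_cons (a := i+1) (b := i+2) (by omega),
        PySem.List.pyRange_one_eq_nil (a := i+1+1) (b := i+2) (by omega)]
    simp
  · rw [if_pos (by omega), if_pos (by omega)]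
    rw [min_eq_right (by omega), PySem.List.pyRange_one_cons (a := i+1) (b := i+3) (by omega),
        PySem.List.pyRange_one_cons (a := i+1+1) (b := i+3) (by omega),
        PySem.List.pyRange_one_eq_nil (a := i+1+1+1) (b := i+3) (by omega)]
    simp only [List.map_cons, List.map_nil, List.sum_cons, List.sum_nil]
    rw [(by ring : i + 1 + 1 = i + 2)]
    ring

lemma window (cur : List Int) (i : Int) (h0 : 0 ≤ i) (hi : i < (cur.length : Int)) :
    (cur.take (min (cur.length : Int) (i+3)).toNat).sum
      - (cur.take (max 0 (i-2)).toNat).sum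
    = pplA cur i + PySem.List.pyGetD cur i 0 := by
  have hL : (0:Int) ≤ (cur.length : Int) := by positivity
  have hA0 : (0:Int) ≤ max 0 (i-2) := le_max_left _ _
  have hAi : max 0 (i-2) ≤ i := max_le h0 (by omega)
  have hiB : i + 1 ≤ min (cur.length : Int) (i+3) := le_min (by omega) (by omega)
  have hBL : min (cur.length : Int) (i+3) ≤ (cur.length : Int) := min_le_left _ _
  rw [tele cur _ _ hA0 (hAi.trans (le_trans (by omega) hiB)) hBL]
  rw [PySem.List.pyRange_one_append (max 0 (i-2)) i (min (cur.length : Int) (i+3)) hAi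
        (le_trans (by omega) hiB)]
  rw [PySem.List.pyRange_one_append i (i+1) (min (cur.length : Int) (i+3)) (by omega) hiB]
  have hmid : PySem.List.pyRange i (i+1) 1 = [i] := by
    rw [PySem.List.pyRange_one_cons (a := i) (b := i+1) (by omega),
        PySem.List.pyRange_one_eq_nil (a := i+1) (b := i+1) le_rfl]
  rw [hmid]
  simp only [List.map_append, List.sum_append, List.map_cons, List.map_nil, List.sum_cons,
    List.sum_nil]
  rw [leftSum _ _ h0, rightSum _ _ _ hi, pplA_eq]
  ring

lemma pref_get_nat (cur : List Int) (j : Nat)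
    (h : j < ([0] ++ (List.range cur.length).map (fun k => 0 + (cur.take (k+1)).sum)).length) :
    ([0] ++ (List.range cur.length).map (fun k => 0 + (cur.take (k+1)).sum))[j]
    = (cur.take j).sum := by
  cases j with
  | zero => simp
  | succ j =>
      have hjlen : j < cur.length := by
        simpa using h
      simp only [List.singleton_append, List.getElem_cons_succ]
      rw [List.getElem_map, List.getElem_range]
      ring_nf

lemma pref_get (cur : List Int) (k : Int) (h0 : 0 ≤ k) (hk : k ≤ (cur.length : Int)) :
    PySem.List.pyGetD
      ((cur.foldl (fun (st : List Int × Int) v => (st.1 ++ [st.2 + v], st.2 + v)) ([0], 0)).1) k 0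
    = (cur.take k.toNat).sum := by
  rw [prefix_fold]
  rw [PySem.List.pyGetD_eq_getElem _ 0 h0 (by simp; omega)]
  exact pref_get_nat cur k.toNat (by simp; omega)

lemma cur_eq_init (path init : List Int) (i : Int)
    (hm : (path.length : Int) ≤ i) (hn : i < (init.length : Int)) :
    PySem.List.pyGetD (path ++ init.drop path.length) i 0 = PySem.List.pyGetD init i 0 := by
  have hp : (0:Int) ≤ (path.length : Int) := by positivity
  have hlen : (path ++ init.drop path.length).length = init.length := by
    simp [List.length_drop]
    omega
  rw [PySem.List.pyGetD_eq_getElem _ 0 (by omega) (by rw [hlen]; omega),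
      PySem.List.pyGetD_eq_getElem _ 0 (by omega) (by omega)]
  rw [List.getElem_append_right (by omega : path.length ≤ i.toNat)]
  rw [List.getElem_drop]
  congr 1
  omega

-- 'for i …: if c(i): continue; …; if e(i) == 0: out.append(i)' as a filter
lemma foldl_skip_if (l : List Int) (c : Int → Prop) [DecidablePred c] (e : Int → Int)
    (acc : List Int) :
    l.foldl (fun acc i => if c i then acc else if e i = 0 then acc ++ [i] else acc) acc
    = acc ++ l.filter (fun i => !decide (c i) && decide (e i = 0)) := by
  induction l generalizing acc with
  | nil => simp
  | cons x xs ih =>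
      simp only [List.foldl_cons, List.filter_cons]
      by_cases hc : c x
      · simp [hc, ih]
      · by_cases he : e x = 0
        · simp [hc, he, ih]
        · simp [hc, he, ih]

theorem find_choices_spec : Claim_equal_find_choices := by
  intro path init _
  unfold Spec_find_choices
  simp only [find_choices, find_choices_alt]
  rw [PySem.List.slice_from_natCast]
  rw [foldl_skip_if]
  rw [List.nil_append]
  apply List.filter_congr
  intro i hmem
  rw [PySem.List.mem_pyRange_one] at hmem
  obtain ⟨hmi, hin⟩ := hmem
  have hp : (0:Int) ≤ (path.length : Int) := by positivity
  have h0 : (0:Int) ≤ i := le_trans hp hmi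
  have hclen : ((path ++ init.drop path.length).length : Int) = (init.length : Int) := by
    simp [List.length_drop]
    omega
  have hiL : i < ((path ++ init.drop path.length).length : Int) := by omega
  rw [pref_get _ (min ((path ++ init.drop path.length).length : Int) (i+3))
        (le_min (by omega) (by omega)) (min_le_left _ _),
      pref_get _ (max 0 (i-2)) (le_max_left _ _) (max_le (by omega) (by omega))]
  rw [window _ i h0 hiL]
  rw [cur_eq_init path init i hmi hin]
  by_cases hz : PySem.List.pyGetD init i 0 = 0
  · rw [hz]
    simp [pplA]
  · simp [hz]
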